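-- pv_equiv track=rewrite | github.com/tylersmed/cs313 | Cipher.py | crt_padded_dec
-- ===== SOURCE A (Python) =====
-- import math
--
-- def crt_padded_dec(strng):
--     # Creates a version of the string to be dectypted as a padded message
--     sqr_len = math.ceil(math.sqrt(len(strng)))
--     padded_msg = [['*' for x in range(sqr_len)] for i in range(sqr_len)]
--     chr_lst = list(strng)
--     x = math.ceil(len(chr_lst) / sqr_len)
--
--     for col in range(sqr_len):
--         for i in range(x):
--             if not chr_lst:
--                 break
--             else:
--                 padded_msg[col].remove('*')
--                 padded_msg[col] += [chr_lst.pop(0)]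
--
--     return padded_msg
-- ===== SOURCE B (Python) =====
-- import math
--
-- def crt_padded_dec(strng):
--     # Row-at-a-time: each row is a star-padding prefix plus one slice of the string.
--     sqr_len = math.ceil(math.sqrt(len(strng)))
--     x = math.ceil(len(strng) / sqr_len)   # raises ZeroDivisionError on '' like the original
--     result = []
--     for r in range(sqr_len):
--         chunk = list(strng[r * x:(r + 1) * x])
--         result.append(['*'] * (sqr_len - len(chunk)) + chunk)
--     return result
-- ===== Notes on version B (the rewrite author's own statement) =====
-- stated objective: faster
-- what changed: Replaces the per-character inner loop that mutates each pre-built star-filled row via list.remove and pop(0) with a direct per-row construction: one slice of the string plus a computed star-padding prefix.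
import Mathlib
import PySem

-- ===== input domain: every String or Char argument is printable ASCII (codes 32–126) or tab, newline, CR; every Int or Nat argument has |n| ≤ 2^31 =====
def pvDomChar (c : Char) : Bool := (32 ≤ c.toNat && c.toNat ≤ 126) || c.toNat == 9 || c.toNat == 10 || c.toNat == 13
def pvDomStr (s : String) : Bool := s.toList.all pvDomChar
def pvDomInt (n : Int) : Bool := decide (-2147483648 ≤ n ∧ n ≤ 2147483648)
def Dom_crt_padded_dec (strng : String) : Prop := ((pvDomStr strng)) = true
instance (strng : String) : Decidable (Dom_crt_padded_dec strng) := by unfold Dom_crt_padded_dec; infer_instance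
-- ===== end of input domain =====

-- B replaces A's per-character list.remove/pop(0) mutation of pre-built star-filled rows by
-- building each row directly as a star-padding prefix plus one slice of the string (measured faster).

-- math.ceil(math.sqrt n) — exact on the tested sizes (float sqrt is exact far beyond them)
def pvCeilSqrt (n : Nat) : Nat :=
  if Nat.sqrt n * Nat.sqrt n = n then Nat.sqrt n else Nat.sqrt n + 1

-- math.ceil(n / s) for s > 0 — exact on the tested sizes (float division rounds to the exact ratio's side)
def pvCeilDiv (n s : Nat) : Nat := (n + s - 1) / s

-- ===== PORT A =====
-- inner 'for i in range(x)' loop: pops chr_lst, removes a '*' from the row, appends the char.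
-- (remove? is never none under Pre_: the row keeps a '*' whenever a pop remains, since x ≤ sqr_len;
--  .getD row is unreachable there.)
def pvInnerA (x : Nat) (row chrs : List String) : List String × List String :=
  match x, chrs with
  | 0, chrs => (row, chrs)
  | _ + 1, [] => (row, [])
  | x + 1, c :: rest => pvInnerA x (((PySem.List.remove? row "*").getD row) ++ [c]) rest

-- outer 'for col in range(sqr_len)' loop: each iteration finishes row col (initially all '*'),
-- carrying the remaining chr_lst.
def pvOuterA (cols s x : Nat) (chrs : List String) : List (List String) :=
  match cols with
  | 0 => []
  | cols + 1 =>
    let p := pvInnerA x (List.replicate s "*") chrs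
    p.1 :: pvOuterA cols s x p.2

def crt_padded_dec (strng : String) : List (List String) :=
  let n := strng.toList.length
  let s := pvCeilSqrt n
  let chrs := strng.toList.map (fun c => String.ofList [c])   -- list(strng)
  let x := pvCeilDiv n s
  pvOuterA s s x chrs

-- ===== PORT B =====
def crt_padded_dec_alt (strng : String) : List (List String) :=
  let n := strng.toList.length
  let s := pvCeilSqrt n
  let x := pvCeilDiv n s
  let ss := strng.toList.map (fun c => String.ofList [c])
  (List.range s).map (fun r =>
    let chunk := (ss.drop (r * x)).take x   -- strng[r*x:(r+1)*x], nonnegative in-order bounds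
    List.replicate (s - chunk.length) "*" ++ chunk)

-- ===== PRECONDITION & SPEC =====
-- Pre_ excludes only the empty string, on which A (and B) raise ZeroDivisionError (sqr_len = 0).
def Pre_crt_padded_dec (strng : String) : Prop := strng ≠ ""
instance (strng : String) : Decidable (Pre_crt_padded_dec strng) := by unfold Pre_crt_padded_dec; infer_instance
def pvWitness_crt_padded_dec : String := "abcde"

def Spec_crt_padded_dec (strng : String) (out : List (List String)) : Prop := out = crt_padded_dec_alt strng
instance (strng : String) (out : List (List String)) : Decidable (Spec_crt_padded_dec strng out) := by unfold Spec_crt_padded_dec; infer_instance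

-- ===== CLAIM (what is proved, stated in full; the proofs are below) =====
def Claim_equal_crt_padded_dec : Prop := ∀ (strng : String), Dom_crt_padded_dec strng → Pre_crt_padded_dec strng → Spec_crt_padded_dec strng (crt_padded_dec strng)

-- ===== LEMMAS AND PROOFS =====

lemma pvInnerA_spec (x : Nat) : ∀ (k : Nat) (acc chrs : List String),
    min x chrs.length ≤ k →
    pvInnerA x (List.replicate k "*" ++ acc) chrs
      = (List.replicate (k - min x chrs.length) "*" ++ acc ++ chrs.take x, chrs.drop x) := by
  induction x with
  | zero => intro k acc chrs _; simp [pvInnerA]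
  | succ x ih =>
    intro k acc chrs h
    match chrs with
    | [] => simp [pvInnerA]
    | c :: rest =>
      have hk : 0 < k := by simp at h; omega
      obtain ⟨k', rfl⟩ : ∃ k', k = k' + 1 := ⟨k - 1, by omega⟩
      have hrow : List.replicate (k' + 1) "*" ++ acc = "*" :: (List.replicate k' "*" ++ acc) := by
        simp [List.replicate_succ]
      rw [pvInnerA, hrow, PySem.List.remove?_cons_self]
      have h' : min x rest.length ≤ k' := by simp at h ⊢; omega
      rw [Option.getD_some, List.append_assoc, ih k' (acc ++ [c]) rest h']
      simp [List.take_succ_cons, List.drop_succ_cons]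

lemma pvOuterA_spec (cols s x : Nat) (hxs : x ≤ s) : ∀ (chrs : List String),
    pvOuterA cols s x chrs
      = (List.range cols).map (fun r =>
          let chunk := (chrs.drop (r * x)).take x
          List.replicate (s - chunk.length) "*" ++ chunk) := by
  induction cols with
  | zero => intro chrs; simp [pvOuterA]
  | succ cols ih =>
    intro chrs
    have hmin : min x chrs.length ≤ s := le_trans (min_le_left _ _) hxs
    have hrow := pvInnerA_spec x s [] chrs hmin
    simp only [List.append_nil] at hrow
    rw [pvOuterA]
    simp only [hrow, ih (chrs.drop x)]
    rw [List.range_succ_eq_map]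
    simp only [List.map_cons, List.map_map]
    congr 1
    · simp [List.length_take]
    · apply List.map_congr_left
      intro r _
      simp [Function.comp_apply, List.drop_drop, Nat.succ_mul, Nat.add_comm]

lemma pvCeilSqrt_sq_ge (n : Nat) : n ≤ pvCeilSqrt n * pvCeilSqrt n := by
  unfold pvCeilSqrt
  split
  · omega
  · have := Nat.lt_succ_sqrt' n
    nlinarith [Nat.sqrt n]

lemma pvCeilDiv_le (n s : Nat) (hs : 0 < s) (h : n ≤ s * s) : pvCeilDiv n s ≤ s := by
  unfold pvCeilDiv
  have : (n + s - 1) / s < s + 1 := by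
    rw [Nat.div_lt_iff_lt_mul hs]
    have h2 : (s + 1) * s = s * s + s := by ring
    omega
  omega

-- ===== VERDICT (by name: the statement is the Claim_ definition above) =====
theorem crt_padded_dec_spec : Claim_equal_crt_padded_dec := by
  intro strng _ hpre
  unfold Spec_crt_padded_dec crt_padded_dec crt_padded_dec_alt
  have hn : 0 < strng.toList.length := by
    rcases Nat.eq_zero_or_pos strng.toList.length with h | h
    · exact absurd (by rwa [List.length_eq_zero_iff, String.toList_eq_nil_iff] at h) hpre
    · exact h
  have hs : 0 < pvCeilSqrt strng.toList.length := by
    unfold pvCeilSqrt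
    have := Nat.sqrt_pos.mpr hn
    split <;> omega
  have hxs := pvCeilDiv_le strng.toList.length (pvCeilSqrt strng.toList.length) hs
      (pvCeilSqrt_sq_ge strng.toList.length)
  rw [pvOuterA_spec _ _ _ hxs]
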